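-- pv_equiv track=rewrite | github.com/paiml/depyler | examples/hard_bitwise_encoding.py | delta_decode
-- ===== SOURCE A (Python) =====
-- def delta_decode(encoded: list[int]) -> list[int]:
--     """Decode a delta-encoded list back to original values."""
--     if len(encoded) == 0:
--         return []
--     result: list[int] = [encoded[0]]
--     i: int = 1
--     while i < len(encoded):
--         result.append(result[i - 1] + encoded[i])
--         i = i + 1
--     return result
-- ===== SOURCE B (Python) =====
-- def delta_decode(encoded: list[int]) -> list[int]:
--     """Decode a delta-encoded list back to original values (divide and conquer)."""
--     if len(encoded) <= 1:
--         return list(encoded)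
--     mid = len(encoded) // 2
--     left = delta_decode(encoded[:mid])
--     right = delta_decode(encoded[mid:])
--     offset = left[-1]
--     return left + [offset + v for v in right]
-- ===== Notes on version B (the rewrite author's own statement) =====
-- stated objective: alternative
-- what changed: Replaced A's left-to-right incremental loop by a divide-and-conquer recursion: decode each half independently, then shift the decoded right half by the last value of the decoded left half; correct because prefix sums of a concatenation are the left prefix sums followed by the right prefix sums offset by the left total.
import Mathlib
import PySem

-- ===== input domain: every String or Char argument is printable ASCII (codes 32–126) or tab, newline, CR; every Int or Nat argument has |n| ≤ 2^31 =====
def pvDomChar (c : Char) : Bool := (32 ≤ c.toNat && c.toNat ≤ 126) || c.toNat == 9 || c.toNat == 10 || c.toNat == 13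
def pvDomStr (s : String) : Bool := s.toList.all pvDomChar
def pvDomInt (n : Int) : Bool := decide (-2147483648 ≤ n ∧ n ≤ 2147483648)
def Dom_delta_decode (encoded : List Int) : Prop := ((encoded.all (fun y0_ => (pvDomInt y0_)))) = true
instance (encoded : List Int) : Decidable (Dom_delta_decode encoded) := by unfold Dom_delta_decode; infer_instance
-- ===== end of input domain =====

-- B replaces A's left-to-right incremental loop by a divide-and-conquer recursion:
-- decode each half, then shift the right half by the last value of the decoded left half.

-- ===== PORT A =====
-- A's while loop: recursion on i with the loop condition i < len(encoded);
-- result[i-1] is read via pyGet? (always in range here), defaulting 0 only to totalize.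
def delta_decode_go (encoded : List Int) (result : List Int) (i : Nat) : List Int :=
  if _h : i < encoded.length then
    delta_decode_go encoded
      (result ++ [((PySem.List.pyGet? result ((i : Int) - 1)).getD 0) + encoded[i]]) (i + 1)
  else result
termination_by encoded.length - i

def delta_decode (encoded : List Int) : List Int :=
  if h : encoded.length = 0 then []
  else delta_decode_go encoded [encoded[0]'(by omega)] 1

-- ===== PORT B =====
-- left[-1] is read via pyGet? (left is nonempty in every recursive call), defaulting 0 only to totalize
def delta_decode_alt (encoded : List Int) : List Int :=
  if _h : encoded.length ≤ 1 then encoded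
  else
    let mid := encoded.length / 2
    let left := delta_decode_alt (PySem.List.slice encoded none (some (mid : Int)))
    let right := delta_decode_alt (PySem.List.slice encoded (some (mid : Int)) none)
    let offset := (PySem.List.pyGet? left (-1)).getD 0
    left ++ right.map (fun v => offset + v)
termination_by encoded.length
decreasing_by
  · rw [PySem.List.slice_to_natCast]; simp only [List.length_take]; omega
  · rw [PySem.List.slice_from_natCast]; simp only [List.length_drop]; omega

-- ===== PRECONDITION & SPEC =====
def Spec_delta_decode (encoded : List Int) (out : List Int) : Prop := out = delta_decode_alt encoded
instance (encoded : List Int) (out : List Int) : Decidable (Spec_delta_decode encoded out) := by unfold Spec_delta_decode; infer_instance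

-- ===== CLAIM =====
def Claim_equal_delta_decode : Prop := ∀ (encoded : List Int), Dom_delta_decode encoded → Spec_delta_decode encoded (delta_decode encoded)

-- ===== LEMMAS AND PROOFS =====

-- running prefix sums starting from total t (common characterisation of both ports)
def pvPrefix (t : Int) : List Int → List Int
  | [] => []
  | x :: xs => (t + x) :: pvPrefix (t + x) xs

theorem go_eq (encoded : List Int) (n i : Nat) (result : List Int)
    (hn : encoded.length - i = n)
    (hlen : result.length = i) (hi : 1 ≤ i) (t : Int) (ht : result.getLast? = some t) :
    delta_decode_go encoded result i = result ++ pvPrefix t (encoded.drop i) := by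
  induction n generalizing i result t with
  | zero =>
    rw [delta_decode_go]
    have h : ¬ i < encoded.length := by omega
    simp [h, List.drop_eq_nil_of_le (by omega : encoded.length ≤ i), pvPrefix]
  | succ n ih =>
    rw [delta_decode_go]
    have h : i < encoded.length := by omega
    simp only [h, dif_pos]
    have hget : PySem.List.pyGet? result ((i : Int) - 1) = some t := by
      have : ((i : Int) - 1) = ((i - 1 : Nat) : Int) := by omega
      rw [this, PySem.List.pyGet?_natCast]
      rw [List.getLast?_eq_getElem?] at ht
      simpa [hlen] using ht
    rw [hget]
    have hdrop : encoded.drop i = encoded[i] :: encoded.drop (i + 1) :=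
      List.drop_eq_getElem_cons h
    rw [ih (i + 1) _ (by omega) (by simp [hlen]) (by omega) (t + encoded[i]) (by simp)]
    rw [hdrop]
    simp only [pvPrefix, List.append_assoc, List.singleton_append, Option.getD_some]

-- A computes pvPrefix 0 encoded
theorem a_eq_prefix (encoded : List Int) : delta_decode encoded = pvPrefix 0 encoded := by
  unfold delta_decode
  cases encoded with
  | nil => rfl
  | cons x xs =>
    simp only [List.length_cons, Nat.succ_ne_zero, dif_neg, not_false_eq_true,
      List.getElem_cons_zero]
    rw [go_eq (x :: xs) xs.length 1 [x] (by simp) (by simp) (by omega) x (by simp)]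
    simp [pvPrefix]

theorem pvPrefix_append (a b : List Int) (t : Int) :
    pvPrefix t (a ++ b) = pvPrefix t a ++ pvPrefix (t + a.sum) b := by
  induction a generalizing t with
  | nil => simp [pvPrefix]
  | cons x xs ih => simp [pvPrefix, ih, add_assoc]

theorem pvPrefix_shift (l : List Int) (c t : Int) :
    pvPrefix (c + t) l = (pvPrefix t l).map (fun v => c + v) := by
  induction l generalizing t with
  | nil => rfl
  | cons x xs ih => simp [pvPrefix, ← ih, add_assoc]

theorem pvPrefix_getLast? (l : List Int) (h : l ≠ []) (t : Int) :
    (pvPrefix t l).getLast? = some (t + l.sum) := by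
  induction l generalizing t with
  | nil => exact absurd rfl h
  | cons x xs ih =>
    cases xs with
    | nil => simp [pvPrefix]
    | cons y ys =>
      rw [pvPrefix, List.getLast?_cons, ih (by simp) (t + x)]
      simp [add_assoc]

-- B computes pvPrefix 0 encoded, by strong induction on length
theorem b_eq_prefix_aux (n : Nat) (l : List Int) (hl : l.length ≤ n) :
    delta_decode_alt l = pvPrefix 0 l := by
  induction n generalizing l with
  | zero =>
    have : l = [] := List.eq_nil_of_length_eq_zero (by omega)
    subst this; rw [delta_decode_alt]; simp [pvPrefix]
  | succ n ih =>
    rw [delta_decode_alt]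
    by_cases h : l.length ≤ 1
    · cases l with
      | nil => simp [pvPrefix]
      | cons x xs =>
        have : xs = [] := List.eq_nil_of_length_eq_zero
          (by simp only [List.length_cons] at h; omega)
        subst this; simp [pvPrefix]
    · simp only [h, dif_neg, not_false_eq_true]
      rw [PySem.List.slice_to_natCast, PySem.List.slice_from_natCast]
      have hmid1 : 1 ≤ l.length / 2 := by omega
      have hmid2 : l.length / 2 < l.length := by omega
      rw [ih _ (by rw [List.length_take]; omega), ih _ (by rw [List.length_drop]; omega)]
      have htake : l.take (l.length / 2) ≠ [] := by
        intro hc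
        have hlen : (l.take (l.length / 2)).length = min (l.length / 2) l.length :=
          List.length_take
        rw [hc] at hlen
        simp only [List.length_nil] at hlen
        omega
      rw [PySem.List.pyGet?_neg_one, pvPrefix_getLast? _ htake 0, Option.getD_some]
      have hsh := pvPrefix_shift (l.drop (l.length / 2)) (0 + (l.take (l.length / 2)).sum) 0
      rw [add_zero] at hsh
      conv_rhs => rw [← List.take_append_drop (l.length / 2) l, pvPrefix_append, hsh]

theorem delta_eq (encoded : List Int) : delta_decode encoded = delta_decode_alt encoded := by
  rw [a_eq_prefix, b_eq_prefix_aux encoded.length encoded le_rfl]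

-- ===== VERDICT =====
theorem delta_decode_spec : Claim_equal_delta_decode := by
  intro encoded _
  exact delta_eq encoded
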